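-- pv_equiv track=rewrite | github.com/Aightech/lcsc_bom_checker | lcsc_bom_checkerC.py | _norm_family_token
-- ===== SOURCE A (Python) =====
-- from typing import Any, Dict, Iterable, List, Optional, Set, Tuple
--
-- PKG_ALIASES = {
--     "WSON": {"WSON", "VSON", "DFN", "SON"},  # lots of ambiguity; treat as family signals
--     "QFN": {"QFN", "VQFN", "MLF"},
--     "LGA": {"LGA"},
--     "BGA": {"BGA", "DSBGA", "WLCSP", "CSP"},
--     "UDFN": {"UDFN", "DFN"},
--     "X2SON": {"X2SON", "XSON", "SON"},
--     "SOT": {"SOT", "SOT23", "SOT-23", "SOT-563", "SOT563"},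
--     "SOP": {"SOP", "SOIC", "TSSOP", "MSOP", "SSOP"},
--     "SOD": {"SOD", "SOD123", "SOD-123", "SOD323", "SOD-323"},
-- }
--
-- def _norm_family_token(tok: str) -> Optional[str]:
--     t = tok.upper().replace("–", "-").strip()
--     for canonical, aliases in PKG_ALIASES.items():
--         if t == canonical:
--             return canonical
--         if t in aliases:
--             return canonical
--     # handle common explicit forms
--     if t.startswith("QFN"):
--         return "QFN"
--     if t.endswith("BGA") or "BGA" in t:
--         return "BGA"
--     return None
-- ===== SOURCE B (Python) =====
-- from typing import Optional
--
-- # Flat alias table, sorted by alias, looked up by hand-written binary search.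
-- # For the ambiguous aliases (DFN, SON) the first family of the original
-- # PKG_ALIASES scan wins, so both map to WSON.
-- _SORTED = [
--     ("BGA", "BGA"), ("CSP", "BGA"), ("DFN", "WSON"), ("DSBGA", "BGA"),
--     ("LGA", "LGA"), ("MLF", "QFN"), ("MSOP", "SOP"), ("QFN", "QFN"),
--     ("SOD", "SOD"), ("SOD-123", "SOD"), ("SOD-323", "SOD"),
--     ("SOD123", "SOD"), ("SOD323", "SOD"), ("SOIC", "SOP"), ("SON", "WSON"),
--     ("SOP", "SOP"), ("SOT", "SOT"), ("SOT-23", "SOT"), ("SOT-563", "SOT"),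
--     ("SOT23", "SOT"), ("SOT563", "SOT"), ("SSOP", "SOP"), ("TSSOP", "SOP"),
--     ("UDFN", "UDFN"), ("VQFN", "QFN"), ("VSON", "WSON"), ("WLCSP", "BGA"),
--     ("WSON", "WSON"), ("X2SON", "X2SON"), ("XSON", "X2SON"),
-- ]
--
-- def _norm_family_token(tok: str) -> Optional[str]:
--     t = tok.upper().replace("\u2013", "-").strip()
--     lo, hi = 0, len(_SORTED)
--     while lo < hi:
--         mid = (lo + hi) // 2
--         k, v = _SORTED[mid]
--         if k < t:
--             lo = mid + 1
--         elif t < k: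
--             hi = mid
--         else:
--             return v
--     if t.startswith("QFN"):
--         return "QFN"
--     if "BGA" in t:
--         return "BGA"
--     return None
-- ===== Notes on version B (the rewrite author's own statement) =====
-- stated objective: alternative
-- what changed: A linearly scans the dict of alias sets family by family on every call; B stores one flat (alias, canonical) table sorted by alias (first family wins for the overlapping aliases DFN and SON) and looks the normalized token up by a hand-written binary search, then applies the same QFN/BGA fallbacks.
import Mathlib
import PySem

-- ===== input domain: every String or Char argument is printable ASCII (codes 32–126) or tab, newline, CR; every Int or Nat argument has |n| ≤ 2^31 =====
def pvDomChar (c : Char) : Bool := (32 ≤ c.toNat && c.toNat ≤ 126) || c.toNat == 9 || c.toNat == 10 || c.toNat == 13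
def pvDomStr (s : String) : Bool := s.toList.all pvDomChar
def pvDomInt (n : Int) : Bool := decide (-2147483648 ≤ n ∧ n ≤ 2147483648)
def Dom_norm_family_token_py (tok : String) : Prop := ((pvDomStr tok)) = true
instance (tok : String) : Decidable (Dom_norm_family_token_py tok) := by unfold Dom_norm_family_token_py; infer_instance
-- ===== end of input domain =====

-- B replaces A's repeated scan over the dict of alias sets by a hand-written
-- binary search over one flat alias table sorted by alias (alternative algorithm).

-- ===== PORT A =====
-- PKG_ALIASES: dict {canonical: set of aliases}, in source order
def pkgAliasesA : List (String × PySem.Set String) :=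
  [("WSON", PySem.Set.ofList ["WSON", "VSON", "DFN", "SON"]),
   ("QFN", PySem.Set.ofList ["QFN", "VQFN", "MLF"]),
   ("LGA", PySem.Set.ofList ["LGA"]),
   ("BGA", PySem.Set.ofList ["BGA", "DSBGA", "WLCSP", "CSP"]),
   ("UDFN", PySem.Set.ofList ["UDFN", "DFN"]),
   ("X2SON", PySem.Set.ofList ["X2SON", "XSON", "SON"]),
   ("SOT", PySem.Set.ofList ["SOT", "SOT23", "SOT-23", "SOT-563", "SOT563"]),
   ("SOP", PySem.Set.ofList ["SOP", "SOIC", "TSSOP", "MSOP", "SSOP"]),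
   ("SOD", PySem.Set.ofList ["SOD", "SOD123", "SOD-123", "SOD323", "SOD-323"])]

-- the 'for canonical, aliases in PKG_ALIASES.items(): …' loop with its early returns
def scanAliases : List (String × PySem.Set String) → String → Option String
  | [], _ => none
  | (canonical, aliases) :: rest, t =>
      if t == canonical then some canonical
      else if PySem.Set.contains aliases t then some canonical
      else scanAliases rest t

-- A's body after the normalization of tok into t: the loop, then the fallbacks
def familyScanA (t : String) : Option String :=
  match scanAliases pkgAliasesA t with
  | some c => some c
  | none =>
      if PySem.Str.startswith t "QFN" then some "QFN"
      else if PySem.Str.endswith t "BGA" || PySem.Str.isIn "BGA" t then some "BGA"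
      else none

def norm_family_token_py (tok : String) : Option String :=
  familyScanA (PySem.Str.strip (PySem.Str.replace (PySem.Str.upper tok) "–" "-"))

-- ===== PORT B =====
-- _SORTED: the flat (alias, canonical) table, sorted by alias
def sortedTableB : List (String × String) :=
  [("BGA", "BGA"), ("CSP", "BGA"), ("DFN", "WSON"), ("DSBGA", "BGA"),
   ("LGA", "LGA"), ("MLF", "QFN"), ("MSOP", "SOP"), ("QFN", "QFN"),
   ("SOD", "SOD"), ("SOD-123", "SOD"), ("SOD-323", "SOD"),
   ("SOD123", "SOD"), ("SOD323", "SOD"), ("SOIC", "SOP"), ("SON", "WSON"),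
   ("SOP", "SOP"), ("SOT", "SOT"), ("SOT-23", "SOT"), ("SOT-563", "SOT"),
   ("SOT23", "SOT"), ("SOT563", "SOT"), ("SSOP", "SOP"), ("TSSOP", "SOP"),
   ("UDFN", "UDFN"), ("VQFN", "QFN"), ("VSON", "WSON"), ("WLCSP", "BGA"),
   ("WSON", "WSON"), ("X2SON", "X2SON"), ("XSON", "X2SON")]

-- Python's 'a < b' on strings: lexicographic comparison of code points (exact)
def lexLtChars : List Char → List Char → Bool
  | [], [] => false
  | [], _ :: _ => true
  | _ :: _, [] => false
  | c :: cs, d :: ds =>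
      if c.toNat < d.toNat then true
      else if d.toNat < c.toNat then false
      else lexLtChars cs ds

def strLtB (a b : String) : Bool := lexLtChars a.toList b.toList

-- the 'while lo < hi: …' binary-search loop; fuel bounds the iteration count
-- (each step strictly shrinks hi - lo, so fuel = table length is ample)
def bsearchB (t : String) : Nat → Nat → Nat → Option String
  | 0, _, _ => none
  | fuel + 1, lo, hi =>
      if lo < hi then
        match sortedTableB[(lo + hi) / 2]? with
        | some (k, v) =>
            if strLtB k t then bsearchB t fuel ((lo + hi) / 2 + 1) hi
            else if strLtB t k then bsearchB t fuel lo ((lo + hi) / 2)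
            else some v
        | none => none
      else none

-- B's body after the normalization of tok into t: binary search, then the fallbacks
def familyLookupB (t : String) : Option String :=
  match bsearchB t sortedTableB.length 0 sortedTableB.length with
  | some v => some v
  | none =>
      if PySem.Str.startswith t "QFN" then some "QFN"
      else if PySem.Str.isIn "BGA" t then some "BGA"
      else none

def norm_family_token_py_alt (tok : String) : Option String :=
  familyLookupB (PySem.Str.strip (PySem.Str.replace (PySem.Str.upper tok) "–" "-"))

-- ===== PRECONDITION & SPEC =====
def Spec_norm_family_token_py (tok : String) (out : Option String) : Prop := out = norm_family_token_py_alt tok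
instance (tok : String) (out : Option String) : Decidable (Spec_norm_family_token_py tok out) := by unfold Spec_norm_family_token_py; infer_instance

-- ===== CLAIM (what is proved, stated in full; the proofs are below) =====
def Claim_equal_norm_family_token_py : Prop := ∀ (tok : String), Dom_norm_family_token_py tok → Spec_norm_family_token_py tok (norm_family_token_py tok)

-- ===== LEMMAS AND PROOFS =====

-- every string occurring as a canonical name or an alias
def allKeys : List String :=
  ["WSON", "VSON", "DFN", "SON", "QFN", "VQFN", "MLF", "LGA",
   "BGA", "DSBGA", "WLCSP", "CSP", "UDFN", "X2SON", "XSON",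
   "SOT", "SOT23", "SOT-23", "SOT-563", "SOT563",
   "SOP", "SOIC", "TSSOP", "MSOP", "SSOP",
   "SOD", "SOD123", "SOD-123", "SOD323", "SOD-323"]

theorem scan_eq_none (t : String) (h : t ∉ allKeys) : scanAliases pkgAliasesA t = none := by
  simp only [allKeys, List.mem_cons, List.not_mem_nil, or_false, not_or] at h
  obtain ⟨h1, h2, h3, h4, h5, h6, h7, h8, h9, h10, h11, h12, h13, h14, h15,
    h16, h17, h18, h19, h20, h21, h22, h23, h24, h25, h26, h27, h28, h29, h30⟩ := h
  simp [pkgAliasesA, scanAliases, PySem.Set.contains, PySem.Set.ofList,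
    h1, h2, h3, h4, h5, h6, h7, h8, h9, h10, h11, h12, h13, h14, h15,
    h16, h17, h18, h19, h20, h21, h22, h23, h24, h25, h26, h27, h28, h29, h30]

theorem lexLt_antisymm : ∀ (xs ys : List Char),
    lexLtChars xs ys = false → lexLtChars ys xs = false → xs = ys := by
  intro xs
  induction xs with
  | nil => intro ys h1 _; cases ys with
    | nil => rfl
    | cons d ds => simp [lexLtChars] at h1
  | cons c cs ih =>
      intro ys h1 h2
      cases ys with
      | nil => simp [lexLtChars] at h2
      | cons d ds =>
          by_cases ha : c.toNat < d.toNat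
          · rw [lexLtChars] at h1; simp [ha] at h1
          · by_cases hb : d.toNat < c.toNat
            · rw [lexLtChars] at h2; simp [hb] at h2
            · rw [lexLtChars] at h1 h2
              simp [ha, hb] at h1 h2
              have hn : c.toNat = d.toNat := by omega
              have hcd : c = d := Char.ext (UInt32.toNat_inj.mp hn)
              exact hcd ▸ congrArg (c :: ·) (ih ds h1 h2)

theorem strLt_antisymm (a b : String) (h1 : strLtB a b = false) (h2 : strLtB b a = false) : a = b := by
  have := lexLt_antisymm a.toList b.toList h1 h2
  exact String.toList_inj.mp this

-- if the binary search returns a value, its key equals t and the pair is in the table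
theorem bsearch_mem (t : String) :
    ∀ (fuel lo hi : Nat) (v : String), bsearchB t fuel lo hi = some v → (t, v) ∈ sortedTableB := by
  intro fuel
  induction fuel with
  | zero => intro lo hi v h; simp [bsearchB] at h
  | succ n ih =>
      intro lo hi v h
      rw [bsearchB] at h
      split_ifs at h with hlt
      · cases hg : sortedTableB[(lo + hi) / 2]? with
        | none => rw [hg] at h; simp at h
        | some p =>
            obtain ⟨k, w⟩ := p
            rw [hg] at h
            simp only at h
            split_ifs at h with h1 h2
            · exact ih _ _ _ h
            · exact ih _ _ _ h
            · have hk : k = t := strLt_antisymm k t (Bool.of_not_eq_true h1) (Bool.of_not_eq_true h2)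
              have hv : w = v := by simpa using h
              subst hk hv
              exact List.mem_of_getElem? hg

theorem table_keys_sub : ∀ p ∈ sortedTableB, p.1 ∈ allKeys := by decide

theorem bsearch_eq_none (t : String) (h : t ∉ allKeys) :
    bsearchB t sortedTableB.length 0 sortedTableB.length = none := by
  cases hb : bsearchB t sortedTableB.length 0 sortedTableB.length with
  | none => rfl
  | some v =>
      exact absurd (table_keys_sub _ (bsearch_mem t _ _ _ v hb)) h

theorem endswith_or_isIn (t : String) :
    (PySem.Str.endswith t "BGA" || PySem.Str.isIn "BGA" t) = PySem.Str.isIn "BGA" t := by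
  cases hw : PySem.Str.endswith t "BGA" with
  | false => simp
  | true =>
      simp only [Bool.true_or]
      symm
      rw [PySem.Str.endswith] at hw
      rw [PySem.Str.isIn, PySem.Chars.isIn_iff_infix]
      exact ((PySem.Chars.endswith_iff _ _).mp hw).isInfix

set_option maxHeartbeats 4000000 in
theorem core_eq (t : String) : familyScanA t = familyLookupB t := by
  by_cases h : t ∈ allKeys
  · fin_cases h <;> decide
  · unfold familyScanA familyLookupB
    rw [scan_eq_none t h, bsearch_eq_none t h, endswith_or_isIn t]

-- ===== VERDICT (by name: the statement is the Claim_ definition above) =====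
theorem norm_family_token_py_spec : Claim_equal_norm_family_token_py := by
  intro tok _
  unfold Spec_norm_family_token_py norm_family_token_py norm_family_token_py_alt
  exact core_eq _
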